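-- pv_equiv track=rewrite | github.com/131say/jti | services/worker/core/diagnostics_status.py | aggregate_diagnostics_status
-- ===== SOURCE A (Python) =====
-- from typing import Any, Literal
--
-- def aggregate_diagnostics_status(
--     checks: list[dict[str, Any]],
-- ) -> Literal["pass", "warning", "fail"]:
--     """
--     Итоговый статус джоба по списку проверок:
--
--     - Любой ``severity == "fail"`` (в т.ч. interference) → **fail**.
--     - Иначе любой ``severity == "warning"`` (тонкие стенки, нависания, …) → **warning**.
--     - ``severity == "info"`` (например, корректная зубчатая пара) **не** повышает статус.
--     - Иначе → **pass** (в т.ч. только info или пустой список).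
--     """
--     if any(c.get("severity") == "fail" for c in checks):
--         return "fail"
--     if any(c.get("severity") == "warning" for c in checks):
--         return "warning"
--     return "pass"
-- ===== SOURCE B (Python) =====
-- def aggregate_diagnostics_status(checks):
--     warning = False
--     for c in checks:
--         s = c.get("severity")
--         if s == "fail":
--             return "fail"
--         if s == "warning":
--             warning = True
--     return "warning" if warning else "pass"
-- ===== Notes on version B (the rewrite author's own statement) =====
-- stated objective: alternative
-- what changed: Replaces the two short-circuit any() scans (up to two passes over checks) with a single explicit loop maintaining a warning flag, returning 'fail' early.
import Mathlib
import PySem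

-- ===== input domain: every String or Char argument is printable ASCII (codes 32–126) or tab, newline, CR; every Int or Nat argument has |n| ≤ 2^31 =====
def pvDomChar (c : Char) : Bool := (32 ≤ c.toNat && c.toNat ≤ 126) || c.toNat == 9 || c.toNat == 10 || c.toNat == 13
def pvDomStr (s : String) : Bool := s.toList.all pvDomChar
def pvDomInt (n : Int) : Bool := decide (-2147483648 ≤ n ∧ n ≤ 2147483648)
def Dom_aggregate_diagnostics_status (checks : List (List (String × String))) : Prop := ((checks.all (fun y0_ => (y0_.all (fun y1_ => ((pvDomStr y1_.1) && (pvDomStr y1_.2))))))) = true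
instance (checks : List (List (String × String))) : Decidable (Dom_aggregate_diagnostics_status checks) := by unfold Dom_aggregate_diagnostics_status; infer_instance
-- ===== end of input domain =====

-- B fuses A's two any() scans into one explicit loop with a warning flag (alternative decomposition, same cost).


-- ===== PORT A =====
-- c.get("severity") on the assoc-list dict
def pvGetSev (c : List (String × String)) : Option String := (PySem.Dict.mk c).get? "severity"

def aggregate_diagnostics_status (checks : List (List (String × String))) : String :=
  if checks.any (fun c => pvGetSev c == some "fail") then "fail"
  else if checks.any (fun c => pvGetSev c == some "warning") then "warning"
  else "pass"

-- ===== PORT B =====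
-- B: one explicit pass with a warning flag, early return on "fail"
def pvAltLoop : List (List (String × String)) → Bool → String
  | [], w => if w then "warning" else "pass"
  | c :: rest, w =>
    let s := pvGetSev c
    if s == some "fail" then "fail"
    else pvAltLoop rest (w || (s == some "warning"))

def aggregate_diagnostics_status_alt (checks : List (List (String × String))) : String :=
  pvAltLoop checks false

-- ===== PRECONDITION & SPEC =====
def Spec_aggregate_diagnostics_status (checks : List (List (String × String))) (out : String) : Prop := out = aggregate_diagnostics_status_alt checks
instance (checks : List (List (String × String))) (out : String) : Decidable (Spec_aggregate_diagnostics_status checks out) := by unfold Spec_aggregate_diagnostics_status; infer_instance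

-- ===== CLAIM (what is proved, stated in full; the proofs are below) =====
def Claim_equal_aggregate_diagnostics_status : Prop := ∀ (checks : List (List (String × String))), Dom_aggregate_diagnostics_status checks → Spec_aggregate_diagnostics_status checks (aggregate_diagnostics_status checks)

-- ===== LEMMAS AND PROOFS =====

-- ===== VERDICT (by name: the statement is the Claim_ definition above) =====
lemma pvAltLoop_char (checks : List (List (String × String))) (w : Bool) :
    pvAltLoop checks w =
      if checks.any (fun c => pvGetSev c == some "fail") then "fail"
      else if w || checks.any (fun c => pvGetSev c == some "warning") then "warning"
      else "pass" := by
  induction checks generalizing w with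
  | nil => simp [pvAltLoop]
  | cons c rest ih =>
    simp only [pvAltLoop, List.any_cons]
    by_cases hf : pvGetSev c == some "fail"
    · simp [hf]
    · rw [if_neg (by simp [hf]), ih]
      by_cases hr : rest.any (fun c => pvGetSev c == some "fail")
      · simp [hf, hr]
      · simp [hf, hr, Bool.or_assoc]

theorem aggregate_diagnostics_status_spec : Claim_equal_aggregate_diagnostics_status := by
  intro checks _
  unfold Spec_aggregate_diagnostics_status aggregate_diagnostics_status aggregate_diagnostics_status_alt
  rw [pvAltLoop_char]
  simp
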